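-- pv_equiv track=rewrite | github.com/jae1jeong/Algorithm | Baekjun/BruteForce/The Candy war.py | teacher
-- ===== SOURCE A (Python) =====
-- def teacher(N, candy):
--     tmp_list = [0 for i in range(N)]
--     for idx in range(N):
--         if candy[idx] % 2:  # 홀수 경우 1을 더해주고
--             candy[idx] += 1
--
--         candy[idx] //= 2  # 절반으로 나누고
--         # 절반으로 나눈 값을 tmp_list를 저장하면서 오른쪽 아이에게 줄 배열을 저장
--         tmp_list[(idx+1) % N] = candy[idx]
--
--     for idx in range(N):
--         candy[idx] += tmp_list[idx]  # 오른쪽 아이가 캔디를 나눠준다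
--
--     return candy
-- ===== SOURCE B (Python) =====
-- def teacher(N, candy):
--     # Single pass: thread the running carry (the half given by the left neighbour)
--     # instead of a temp array and a second pass. Mutates candy in place like A.
--     if N <= 0:
--         return candy
--     carry = (candy[N - 1] + 1) // 2     # wrap-around half from the last child
--     for idx in range(N):
--         h = (candy[idx] + 1) // 2       # read the still-original value
--         candy[idx] = h + carry
--         carry = h
--     return candy
-- ===== Notes on version B (the rewrite author's own statement) =====
-- stated objective: simpler
-- what changed: B replaces A's temp array and two index passes by a single pass that threads a running carry (the half handed over by the left neighbour), reading candy[N-1] up front for the wrap-around.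
import Mathlib
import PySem

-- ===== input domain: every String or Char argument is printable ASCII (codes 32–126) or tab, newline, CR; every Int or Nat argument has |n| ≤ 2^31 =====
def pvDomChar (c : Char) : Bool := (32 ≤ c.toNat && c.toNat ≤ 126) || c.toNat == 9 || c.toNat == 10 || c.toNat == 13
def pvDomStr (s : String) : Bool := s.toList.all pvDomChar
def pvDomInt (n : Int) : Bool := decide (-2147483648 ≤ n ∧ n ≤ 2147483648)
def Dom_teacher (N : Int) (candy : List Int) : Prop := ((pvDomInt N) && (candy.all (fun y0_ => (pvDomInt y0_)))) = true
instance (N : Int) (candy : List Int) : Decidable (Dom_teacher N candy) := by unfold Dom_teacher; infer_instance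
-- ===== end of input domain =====

-- B replaces A's temp array and two passes by a single carry-threading pass (simpler, same cost);
-- both Pythons mutate `candy` in place identically, the equivalence proved is about the return value.


-- ===== PORT A =====
-- body of A's first loop: halve candy[idx] (rounding up, via the +1-if-odd dance) and
-- store the half at tmp_list[(idx+1) % N]
def stepA (N : Int) (st : List Int × List Int) (idx : Int) : List Int × List Int :=
  let c := st.1
  let t := st.2
  let c := if PySem.Int.mod (PySem.List.pyGetD c idx 0) 2 ≠ 0
           then PySem.List.pySetD c idx (PySem.List.pyGetD c idx 0 + 1)
           else c
  let c := PySem.List.pySetD c idx (PySem.Int.floordiv (PySem.List.pyGetD c idx 0) 2)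
  let t := PySem.List.pySetD t (PySem.Int.mod (idx + 1) N) (PySem.List.pyGetD c idx 0)
  (c, t)

-- body of A's second loop: candy[idx] += tmp_list[idx]
def stepA2 (t : List Int) (c : List Int) (idx : Int) : List Int :=
  PySem.List.pySetD c idx (PySem.List.pyGetD c idx 0 + PySem.List.pyGetD t idx 0)

def teacher (N : Int) (candy : List Int) : List Int :=
  let tmp0 : List Int := (PySem.List.pyRange 0 N 1).map (fun _ => (0 : Int))
  let st := (PySem.List.pyRange 0 N 1).foldl (stepA N) (candy, tmp0)
  (PySem.List.pyRange 0 N 1).foldl (stepA2 st.2) st.1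

-- ===== PORT B =====
-- body of B's single loop: h = (candy[idx]+1)//2; candy[idx] = h + carry; carry = h
def stepB (st : List Int × Int) (idx : Int) : List Int × Int :=
  let h := PySem.Int.floordiv (PySem.List.pyGetD st.1 idx 0 + 1) 2
  (PySem.List.pySetD st.1 idx (h + st.2), h)

def teacher_alt (N : Int) (candy : List Int) : List Int :=
  if N ≤ 0 then candy
  else
    let carry0 := PySem.Int.floordiv (PySem.List.pyGetD candy (N - 1) 0 + 1) 2
    ((PySem.List.pyRange 0 N 1).foldl stepB (candy, carry0)).1

-- ===== PRECONDITION & SPEC =====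
-- Pre_: exactly the inputs on which A returns normally; for N > len(candy) A raises IndexError.
def Pre_teacher (N : Int) (candy : List Int) : Prop := N ≤ (candy.length : Int)
instance (N : Int) (candy : List Int) : Decidable (Pre_teacher N candy) := by unfold Pre_teacher; infer_instance
def pvWitness_teacher : Int × List Int := (3, [5, 2, 7])

def Spec_teacher (N : Int) (candy : List Int) (out : List Int) : Prop := out = teacher_alt N candy
instance (N : Int) (candy : List Int) (out : List Int) : Decidable (Spec_teacher N candy out) := by unfold Spec_teacher; infer_instance

-- ===== CLAIM (what is proved, stated in full; the proofs are below) =====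
def Claim_equal_teacher : Prop := ∀ (N : Int) (candy : List Int), Dom_teacher N candy → Pre_teacher N candy → Spec_teacher N candy (teacher N candy)

-- ===== LEMMAS AND PROOFS =====

-- half of x, rounded up (what both programs compute per element)
def hv (x : Int) : Int := PySem.Int.floordiv (x + 1) 2

-- the half of element j of the original list
def hj (cd : List Int) (j : Nat) : Int := hv (cd.getD j 0)

-- halving an even number is also halving with rounding up
lemma hv_even (x : Int) (h : ¬ PySem.Int.mod x 2 ≠ 0) : PySem.Int.floordiv x 2 = hv x := by
  have h2 : (0 : Int) < 2 := by omega
  unfold hv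
  rw [PySem.Int.floordiv_eq_ediv_of_pos h2, PySem.Int.floordiv_eq_ediv_of_pos h2]
  rw [PySem.Int.mod_eq_emod_of_pos (a := x) h2] at h
  omega

lemma getD_mr (n m : Nat) (f : Nat → Int) (hm : m < n) :
    ((List.range n).map f).getD m 0 = f m := by
  rw [List.getD_eq_getElem _ _ (by simpa using hm)]
  simp

lemma getD_mra (n m : Nat) (f : Nat → Int) (rest : List Int) (hm : m < n) :
    ((List.range n).map f ++ rest).getD m 0 = f m := by
  rw [List.getD_append _ _ _ _ (by simpa using hm), getD_mr n m f hm]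

lemma set_mr (n m : Nat) (f : Nat → Int) (v : Int) :
    ((List.range n).map f).set m v = (List.range n).map (fun j => if j = m then v else f j) := by
  apply List.ext_getElem
  · simp
  · intro i h1 h2
    simp only [List.getElem_set, List.getElem_map, List.getElem_range]
    simp only [List.length_set, List.length_map, List.length_range] at h1
    by_cases hi : i = m
    · simp [hi]
    · simp [hi, Ne.symm hi]

lemma set_mra (n m : Nat) (f : Nat → Int) (rest : List Int) (v : Int) (hm : m < n) :
    ((List.range n).map f ++ rest).set m v
      = (List.range n).map (fun j => if j = m then v else f j) ++ rest := by
  rw [List.set_append_left m v (by simpa using hm), set_mr]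

-- a list is its first n elements (as a range-map) followed by its tail
lemma mra_id (cd : List Int) (n : Nat) (hn : n ≤ cd.length) :
    (List.range n).map (fun j => cd.getD j 0) ++ cd.drop n = cd := by
  have : (List.range n).map (fun j => cd.getD j 0) = cd.take n := by
    apply List.ext_getElem
    · simp [hn]
    · intro i h1 h2
      simp only [List.length_map, List.length_range] at h1
      have hi : i < cd.length := lt_of_lt_of_le h1 hn
      simp [List.getD_eq_getElem?_getD, List.getElem?_eq_getElem hi]
  rw [this, List.take_append_drop]

-- A's tmp_list after the first k steps of pass 1 (k ≤ n)
def tA (cd : List Int) (n k : Nat) (j : Nat) : Int :=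
  if j = 0 then (if k = n then hj cd (n - 1) else 0)
  else if j ≤ k then hj cd (j - 1) else 0

-- invariant of A's first pass
lemma passA (cd : List Int) (n : Nat) (hn : n ≤ cd.length) (hpos : 1 ≤ n) :
    ∀ k, k ≤ n →
      (PySem.List.pyRange 0 (k : Int) 1).foldl (stepA (n : Int))
          (cd, (List.range n).map (fun _ => (0 : Int)))
      = ((List.range n).map (fun j => if j < k then hj cd j else cd.getD j 0) ++ cd.drop n,
         (List.range n).map (tA cd n k)) := by
  intro k
  induction k with
  | zero =>
    intro _
    rw [Nat.cast_zero, PySem.List.pyRange_one_eq_nil le_rfl]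
    simp only [List.foldl_nil, Prod.mk.injEq]
    constructor
    · rw [show (fun j => if j < 0 then hj cd j else cd.getD j 0) = (fun j => cd.getD j 0) from by
        funext j; simp]
      exact (mra_id cd n hn).symm
    · apply List.map_congr_left
      intro j hjr
      unfold tA
      have h0 : ¬ (0 = n) := by omega
      by_cases hj0 : j = 0
      · simp [hj0, h0]
      · simp [hj0]
  | succ k ih =>
    intro hk
    have hkn : k < n := by omega
    have ih' := ih (by omega)
    rw [show ((k + 1 : Nat) : Int) = (k : Int) + 1 from by push_cast; ring,
        PySem.List.pyRange_one_succ_right (by exact_mod_cast Nat.zero_le k),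
        List.foldl_append, ih']
    simp only [List.foldl_cons, List.foldl_nil, stepA]
    simp only [PySem.List.pyGetD_natCast, PySem.List.pySetD_natCast]
    rw [getD_mra n k _ _ hkn]
    simp only [lt_self_iff_false, if_false]
    rw [show ((k : Int) + 1) = ((k + 1 : Nat) : Int) from by push_cast; ring,
        PySem.Int.mod_natCast]
    have hm : (k + 1) % n = if k + 1 = n then 0 else k + 1 := by
      split_ifs with h
      · rw [h, Nat.mod_self]
      · exact Nat.mod_eq_of_lt (by omega)
    split_ifs with hodd
    · -- odd branch: candy[k] += 1 first
      rw [set_mra n k _ _ _ hkn, getD_mra n k _ _ hkn, if_pos rfl,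
          show PySem.Int.floordiv (cd.getD k 0 + 1) 2 = hj cd k from rfl,
          set_mra n k _ _ _ hkn, getD_mra n k _ _ hkn, if_pos rfl, hm]
      by_cases hn1 : k + 1 = n
      · rw [if_pos hn1, PySem.List.pySetD_natCast, set_mr]
        simp only [Prod.mk.injEq]
        constructor
        · congr 1
          apply List.map_congr_left
          intro j hjr
          have hjn := List.mem_range.1 hjr
          split_ifs <;> first | rfl | (congr 1; omega)
        · apply List.map_congr_left
          intro j hjr
          have hjn := List.mem_range.1 hjr
          unfold tA
          split_ifs <;> first | rfl | (congr 1; omega)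
      · rw [if_neg hn1, PySem.List.pySetD_natCast, set_mr]
        simp only [Prod.mk.injEq]
        constructor
        · congr 1
          apply List.map_congr_left
          intro j hjr
          have hjn := List.mem_range.1 hjr
          split_ifs <;> first | rfl | (congr 1; omega)
        · apply List.map_congr_left
          intro j hjr
          have hjn := List.mem_range.1 hjr
          unfold tA
          split_ifs <;> first | rfl | (congr 1; omega)
    · -- even branch
      rw [getD_mra n k _ _ hkn]
      simp only [lt_self_iff_false, if_false]
      rw [hv_even _ hodd,
          show hv (cd.getD k 0) = hj cd k from rfl,
          set_mra n k _ _ _ hkn, getD_mra n k _ _ hkn, if_pos rfl, hm]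
      by_cases hn1 : k + 1 = n
      · rw [if_pos hn1, PySem.List.pySetD_natCast, set_mr]
        simp only [Prod.mk.injEq]
        constructor
        · congr 1
          apply List.map_congr_left
          intro j hjr
          have hjn := List.mem_range.1 hjr
          split_ifs <;> first | rfl | (congr 1; omega)
        · apply List.map_congr_left
          intro j hjr
          have hjn := List.mem_range.1 hjr
          unfold tA
          split_ifs <;> first | rfl | (congr 1; omega)
      · rw [if_neg hn1, PySem.List.pySetD_natCast, set_mr]
        simp only [Prod.mk.injEq]
        constructor
        · congr 1
          apply List.map_congr_left
          intro j hjr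
          have hjn := List.mem_range.1 hjr
          split_ifs <;> first | rfl | (congr 1; omega)
        · apply List.map_congr_left
          intro j hjr
          have hjn := List.mem_range.1 hjr
          unfold tA
          split_ifs <;> first | rfl | (congr 1; omega)

-- invariant of A's second pass
lemma passA2 (cd : List Int) (n : Nat) (t : List Int) :
    ∀ k, k ≤ n →
      (PySem.List.pyRange 0 (k : Int) 1).foldl (stepA2 t)
          ((List.range n).map (fun j => hj cd j) ++ cd.drop n)
      = (List.range n).map (fun j => if j < k then hj cd j + t.getD j 0 else hj cd j) ++ cd.drop n := by
  intro k
  induction k with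
  | zero =>
    intro _
    rw [Nat.cast_zero, PySem.List.pyRange_one_eq_nil le_rfl]
    simp only [List.foldl_nil]
    rw [show (fun j => if j < 0 then hj cd j + t.getD j 0 else hj cd j)
          = (fun j => hj cd j) from by funext j; simp]
  | succ k ih =>
    intro hk
    have hkn : k < n := by omega
    have ih' := ih (by omega)
    rw [show ((k + 1 : Nat) : Int) = (k : Int) + 1 from by push_cast; ring,
        PySem.List.pyRange_one_succ_right (by exact_mod_cast Nat.zero_le k),
        List.foldl_append, ih']
    simp only [List.foldl_cons, List.foldl_nil, stepA2]
    simp only [PySem.List.pyGetD_natCast, PySem.List.pySetD_natCast]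
    rw [getD_mra n k _ _ hkn]
    simp only [lt_self_iff_false, if_false]
    rw [set_mra n k _ _ _ hkn]
    congr 1
    apply List.map_congr_left
    intro j hjr
    have hjn := List.mem_range.1 hjr
    by_cases hjk : j = k
    · subst hjk
      rw [if_pos rfl, if_pos (by omega)]
    · rw [if_neg hjk]
      by_cases h2 : j < k
      · rw [if_pos h2, if_pos (by omega)]
      · rw [if_neg h2, if_neg (by omega)]

-- invariant of B's single pass
lemma passB (cd : List Int) (n : Nat) (hn : n ≤ cd.length) :
    ∀ k, k ≤ n →
      (PySem.List.pyRange 0 (k : Int) 1).foldl stepB (cd, hj cd (n - 1))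
      = ((List.range n).map (fun j =>
            if j < k then hj cd j + (if j = 0 then hj cd (n - 1) else hj cd (j - 1))
            else cd.getD j 0) ++ cd.drop n,
         if k = 0 then hj cd (n - 1) else hj cd (k - 1)) := by
  intro k
  induction k with
  | zero =>
    intro _
    rw [Nat.cast_zero, PySem.List.pyRange_one_eq_nil le_rfl]
    simp only [List.foldl_nil, Prod.mk.injEq]
    constructor
    · rw [show (fun j => if j < 0 then hj cd j + (if j = 0 then hj cd (n - 1) else hj cd (j - 1))
            else cd.getD j 0) = (fun j => cd.getD j 0) from by funext j; simp]
      exact (mra_id cd n hn).symm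
    · rfl
  | succ k ih =>
    intro hk
    have hkn : k < n := by omega
    have ih' := ih (by omega)
    rw [show ((k + 1 : Nat) : Int) = (k : Int) + 1 from by push_cast; ring,
        PySem.List.pyRange_one_succ_right (by exact_mod_cast Nat.zero_le k),
        List.foldl_append, ih']
    simp only [List.foldl_cons, List.foldl_nil, stepB]
    simp only [PySem.List.pyGetD_natCast, PySem.List.pySetD_natCast]
    rw [getD_mra n k _ _ hkn]
    simp only [lt_self_iff_false, if_false]
    rw [show PySem.Int.floordiv (cd.getD k 0 + 1) 2 = hj cd k from rfl,
        set_mra n k _ _ _ hkn]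
    simp only [Prod.mk.injEq]
    constructor
    · congr 1
      apply List.map_congr_left
      intro j hjr
      have hjn := List.mem_range.1 hjr
      by_cases hjk : j = k
      · subst hjk
        rw [if_pos rfl, if_pos (show j < j + 1 from by omega)]
      · rw [if_neg hjk]
        by_cases h2 : j < k
        · rw [if_pos h2, if_pos (show j < k + 1 from by omega)]
        · rw [if_neg h2, if_neg (show ¬ j < k + 1 from by omega)]
    · rw [if_neg (by omega : ¬ (k + 1 = 0))]
      simp

theorem teacher_spec : Claim_equal_teacher := by
  intro N candy _hdom hpre
  unfold Spec_teacher teacher teacher_alt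
  by_cases hN : N ≤ 0
  · rw [if_pos hN]
    simp [PySem.List.pyRange_one_eq_nil hN]
  · rw [if_neg hN]
    obtain ⟨n, rfl⟩ : ∃ n : Nat, N = (n : Int) := ⟨N.toNat, (Int.toNat_of_nonneg (by omega)).symm⟩
    have hpos : 1 ≤ n := by
      have h0 : 0 < (n : Int) := by omega
      exact_mod_cast h0
    have hn : n ≤ candy.length := by
      unfold Pre_teacher at hpre
      exact_mod_cast hpre
    have htmp : (PySem.List.pyRange 0 (n : Int) 1).map (fun _ => (0 : Int))
        = (List.range n).map (fun _ => (0 : Int)) := by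
      rw [PySem.List.pyRange_one]
      simp [Function.comp_def]
    have key := passA candy n hn hpos n le_rfl
    rw [List.map_congr_left (fun j hjr =>
          if_pos (List.mem_range.1 hjr) :
          ∀ j ∈ List.range n, (if j < n then hj candy j else candy.getD j 0) = hj candy j)] at key
    have key2 := passA2 candy n ((List.range n).map (tA candy n n)) n le_rfl
    have keyB := passB candy n hn n le_rfl
    have hcarry : PySem.Int.floordiv (PySem.List.pyGetD candy ((n : Int) - 1) 0 + 1) 2
        = hj candy (n - 1) := by
      rw [show ((n : Int) - 1) = ((n - 1 : Nat) : Int) from by omega, PySem.List.pyGetD_natCast]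
      rfl
    dsimp only
    rw [htmp, key]
    dsimp only
    rw [key2, hcarry, keyB]
    dsimp only
    congr 1
    apply List.map_congr_left
    intro j hjr
    have hjn := List.mem_range.1 hjr
    rw [if_pos hjn, if_pos hjn, getD_mr n j _ hjn]
    unfold tA
    split_ifs <;> first | rfl | (exfalso; omega)
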